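-- pv_equiv track=rewrite | github.com/SS-hj/coding_test | programmers/131127.py | solution
-- ===== SOURCE A (Python) =====
-- def solution(want, number, discount):
--     cnt = 0
--     for i in range(len(discount)-9):
--         for product, num in zip(want, number):
--             if discount[i:i+10].count(product) < num:
--                 break
--         else:
--             cnt += 1
--     return cnt
-- ===== SOURCE B (Python) =====
-- def solution(want, number, discount):
--     # Sliding-window counter: maintain counts of the current 10-item window
--     # incrementally instead of re-slicing and re-counting it for every product.
--     cnt = {}
--     for item in discount[:10]:
--         cnt[item] = cnt.get(item, 0) + 1
--     pairs = list(zip(want, number))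
--     n = len(discount)
--     total = 0
--     for i in range(n - 9):
--         if all(cnt.get(p, 0) >= num for p, num in pairs):
--             total += 1
--         if i + 10 < n:
--             cnt[discount[i]] -= 1
--             cnt[discount[i + 10]] = cnt.get(discount[i + 10], 0) + 1
--     return total
-- ===== Notes on version B (the rewrite author's own statement) =====
-- stated objective: alternative
-- what changed: Replaces per-window re-slicing and per-product .count over each 10-item slice with a single sliding-window dict of counts updated once per shift and checked against the wanted quantities.
import Mathlib
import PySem

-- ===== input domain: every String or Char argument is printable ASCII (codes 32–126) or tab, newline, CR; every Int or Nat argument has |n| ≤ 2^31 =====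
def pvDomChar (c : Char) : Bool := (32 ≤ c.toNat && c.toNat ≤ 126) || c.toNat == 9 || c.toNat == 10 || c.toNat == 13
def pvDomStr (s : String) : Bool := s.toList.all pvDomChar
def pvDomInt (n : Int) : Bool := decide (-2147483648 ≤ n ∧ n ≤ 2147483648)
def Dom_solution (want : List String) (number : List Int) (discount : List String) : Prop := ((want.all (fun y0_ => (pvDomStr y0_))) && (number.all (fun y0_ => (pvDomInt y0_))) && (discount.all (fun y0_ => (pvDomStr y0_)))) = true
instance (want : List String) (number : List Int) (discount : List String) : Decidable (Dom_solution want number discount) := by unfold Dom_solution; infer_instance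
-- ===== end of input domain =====

-- B maintains a sliding-window dict of counts, updated once per shift, instead of
-- A's fresh slice + .count per product per window; return values are proved equal.

-- ===== PORT A =====
-- the inner 'for product, num in zip(want, number): … break / else' loop
def solCheck : List (String × Int) → List String → Bool
  | [], _ => true
  | pr :: rest, win => if PySem.List.count win pr.1 < pr.2 then false else solCheck rest win

def solution (want : List String) (number : List Int) (discount : List String) : Int :=
  (PySem.List.pyRange 0 ((discount.length : Int) - 9) 1).foldl
    (fun cnt i =>
      if solCheck (want.zip number) (PySem.List.slice discount (some i) (some (i + 10))) then cnt + 1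
      else cnt) 0

-- ===== PORT B =====
-- one loop iteration: check the current window against all pairs, then slide the window
-- (cnt[discount[i]] -= 1 ported with modify: the key is always present, count ≥ 1)
def solAltStep (pairs : List (String × Int)) (discount : List String) (n : Int)
    (st : PySem.Dict String Int × Int) (i : Int) : PySem.Dict String Int × Int :=
  let total := if pairs.all (fun pr => decide (pr.2 ≤ st.1.getD pr.1 0)) then st.2 + 1 else st.2
  if i + 10 < n then
    let d1 := st.1.modify (PySem.List.pyGetD discount i "") 0 (· - 1)
    (d1.insert (PySem.List.pyGetD discount (i + 10) "")
       (d1.getD (PySem.List.pyGetD discount (i + 10) "") 0 + 1), total)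
  else (st.1, total)

def solution_alt (want : List String) (number : List Int) (discount : List String) : Int :=
  let cnt0 := (PySem.List.slice discount none (some 10)).foldl
    (fun d x => d.insert x (d.getD x 0 + 1)) PySem.Dict.empty
  ((PySem.List.pyRange 0 ((discount.length : Int) - 9) 1).foldl
    (solAltStep (want.zip number) discount (discount.length : Int)) (cnt0, 0)).2

-- ===== PRECONDITION & SPEC =====
def Spec_solution (want : List String) (number : List Int) (discount : List String) (out : Int) : Prop := out = solution_alt want number discount
instance (want : List String) (number : List Int) (discount : List String) (out : Int) : Decidable (Spec_solution want number discount out) := by unfold Spec_solution; infer_instance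

-- ===== CLAIM (what is proved, stated in full; the proofs are below) =====
def Claim_equal_solution : Prop := ∀ (want : List String) (number : List Int) (discount : List String), Dom_solution want number discount → Spec_solution want number discount (solution want number discount)

-- ===== LEMMAS AND PROOFS =====

-- A's break/else scan over the pairs equals B's 'all' check against a dict holding the window counts
lemma solCheck_eq_all (win : List String) (d : PySem.Dict String Int)
    (hd : ∀ p, d.getD p 0 = (win.count p : Int)) :
    ∀ pairs : List (String × Int),
      solCheck pairs win = pairs.all (fun pr => decide (pr.2 ≤ d.getD pr.1 0)) := by
  intro pairs
  induction pairs with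
  | nil => simp [solCheck]
  | cons pr rest ih =>
    simp only [solCheck, List.all_cons, ← ih]
    rw [hd pr.1, PySem.List.count_eq]
    by_cases h : (List.count pr.1 win : Int) < pr.2
    · simp [h, not_le.mpr h]
    · simp [h, not_lt.mp h]

-- shifting the 10-element window by one changes each count by the departing/arriving element
lemma count_window_shift {α : Type} [DecidableEq α] (l : List α) (j : Nat) (p : α)
    (h : j + 10 < l.length) :
    (((l.drop (j + 1)).take 10).count p : Int)
      = (((l.drop j).take 10).count p : Int)
        - (if p = l[j]'(by omega) then 1 else 0)
        + (if p = l[j + 10]'(by omega) then 1 else 0) := by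
  have hj : j < l.length := by omega
  have e1 : (l.drop j).take 11 = l[j]'(by omega) :: (l.drop (j + 1)).take 10 := by
    rw [List.drop_eq_getElem_cons hj, List.take_succ_cons]
  have e2 : (l.drop j).take 11 = (l.drop j).take 10 ++ [l[j + 10]'(by omega)] := by
    rw [List.take_add_one, List.getElem?_drop, List.getElem?_eq_getElem h]
    rfl
  have hc := congrArg (List.count p) (e2.symm.trans e1)
  simp only [List.count_append, List.count_cons, List.count_nil, beq_iff_eq,
    @eq_comm _ _ p] at hc
  split_ifs at hc ⊢ <;> omega

-- main loop invariant: with the dict holding the counts of window [i, i+10), the two folds agree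
lemma loop_eq (discount : List String) (pairs : List (String × Int)) :
    ∀ (k : Nat) (i : Int) (d : PySem.Dict String Int) (t : Int),
      0 ≤ i → i + k = (discount.length : Int) - 9 →
      (∀ p, d.getD p 0 = (((discount.drop i.toNat).take 10).count p : Int)) →
      (PySem.List.pyRange i ((discount.length : Int) - 9) 1).foldl
        (fun cnt j =>
          if solCheck pairs (PySem.List.slice discount (some j) (some (j + 10))) then cnt + 1
          else cnt) t
      = ((PySem.List.pyRange i ((discount.length : Int) - 9) 1).foldl
          (solAltStep pairs discount (discount.length : Int)) (d, t)).2 := by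
  intro k
  induction k with
  | zero =>
    intro i d t h0 hk hinv
    rw [PySem.List.pyRange_one_eq_nil (by omega)]
    rfl
  | succ k ih =>
    intro i d t h0 hk hinv
    have hlt : i < (discount.length : Int) - 9 := by omega
    rw [PySem.List.pyRange_one_cons hlt]
    simp only [List.foldl_cons]
    have hwin : PySem.List.slice discount (some i) (some (i + 10))
        = (discount.drop i.toNat).take 10 := by
      rw [PySem.List.slice_toNat discount h0 (by omega)]
      congr 1
      omega
    have hcheck : solCheck pairs (PySem.List.slice discount (some i) (some (i + 10)))
        = pairs.all (fun pr => decide (pr.2 ≤ d.getD pr.1 0)) := by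
      rw [hwin]; exact solCheck_eq_all _ d hinv pairs
    rw [hcheck]
    by_cases h10 : i + 10 < (discount.length : Int)
    · have hlen : i.toNat + 10 < discount.length := by omega
      have he1 : PySem.List.pyGetD discount i "" = discount[i.toNat]'(by omega) :=
        PySem.List.pyGetD_eq_getElem discount "" h0 (by omega)
      have he2 : PySem.List.pyGetD discount (i + 10) "" = discount[i.toNat + 10]'(by omega) := by
        rw [PySem.List.pyGetD_eq_getElem discount "" (by omega) (by omega)]
        congr 1
        omega
      have hstep : solAltStep pairs discount (discount.length : Int) (d, t) i
          = (((d.modify (discount[i.toNat]'(by omega)) 0 (· - 1)).insert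
               (discount[i.toNat + 10]'(by omega))
               ((d.modify (discount[i.toNat]'(by omega)) 0 (· - 1)).getD
                  (discount[i.toNat + 10]'(by omega)) 0 + 1)),
             if pairs.all (fun pr => decide (pr.2 ≤ d.getD pr.1 0)) then t + 1 else t) := by
        simp only [solAltStep, he1, he2, if_pos h10]
      rw [hstep]
      apply ih (i + 1) _ _ (by omega) (by omega)
      intro p
      have hs := count_window_shift discount i.toNat p hlen
      have hdr : (i + 1).toNat = i.toNat + 1 := by omega
      rw [hdr]
      have hd1 : ∀ x, ((d.modify (discount[i.toNat]'(by omega)) 0 (· - 1)).getD x 0)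
          = if x = discount[i.toNat]'(by omega)
            then d.getD (discount[i.toNat]'(by omega)) 0 - 1 else d.getD x 0 :=
        fun x => PySem.Dict.getD_modify d _ x 0 _
      rw [PySem.Dict.getD_insert]
      simp only [hd1, hinv]
      generalize discount[i.toNat]'(by omega) = e1 at hs ⊢
      generalize discount[i.toNat + 10]'(by omega) = e2 at hs ⊢
      split_ifs at hs ⊢ <;> subst_vars <;>
        first
          | omega
          | exact absurd rfl (by assumption)
    · have hend : (discount.length : Int) - 9 ≤ i + 1 := by omega
      rw [PySem.List.pyRange_one_eq_nil hend]
      simp only [List.foldl_nil, solAltStep, if_neg h10]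

-- ===== VERDICT (by name: the statement is the Claim_ definition above) =====
theorem solution_spec : Claim_equal_solution := by
  intro want number discount _
  show solution want number discount = solution_alt want number discount
  unfold solution solution_alt
  by_cases hm : 0 ≤ (discount.length : Int) - 9
  · apply loop_eq discount (want.zip number) ((discount.length : Int) - 9).toNat 0 _ 0 le_rfl
      (by omega)
    intro p
    have hsl : PySem.List.slice discount none (some 10) = discount.take 10 := by
      rw [PySem.List.slice_to discount (by norm_num)]
      rfl
    rw [hsl, PySem.Dict.getD_foldl_insert_add_one, PySem.Dict.getD_empty]
    simp
  · rw [PySem.List.pyRange_one_eq_nil (by omega)]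
    rfl
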